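-- pv_equiv track=rewrite | github.com/Beminent-yun/Generative_Retrieval | evaluate.py | build_prefix_to_next_tokens
-- ===== SOURCE A (Python) =====
-- from typing import Dict, List, Tuple
--
-- def build_prefix_to_next_tokens(
--     sid2item: Dict[tuple, List[int]],
--     code_offset: int = 3
-- ) -> Dict[tuple, List[int]]:
--     """
--     根据有效 semantic id 构建前缀约束表：
--     {prefix_tokens: [allowed_next_token, ...]}
--     """
--     prefix_to_next = {}
--     for raw_sid in sid2item.keys():
--         for depth in range(len(raw_sid)):
--             prefix = tuple(raw_sid[i] + code_offset for i in range(depth))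
--             next_token = raw_sid[depth] + code_offset
--             if prefix not in prefix_to_next:
--                 prefix_to_next[prefix] = set()
--             prefix_to_next[prefix].add(next_token)
--
--     return {k: sorted(v) for k, v in prefix_to_next.items()}
-- ===== SOURCE B (Python) =====
-- def build_prefix_to_next_tokens(sid2item, code_offset=3):
--     """Trie-based: insert every sid into a trie of offset-shifted tokens,
--     recording each node the first time it gains a child; then emit each
--     recorded prefix with the sorted keys of its node's children."""
--     root = {}
--     order = []  # (prefix_tuple, node) in the order nodes first gain a child
--     for raw_sid in sid2item:
--         node, prefix = root, ()
--         for tok in raw_sid: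
--             t = tok + code_offset
--             if not node:
--                 order.append((prefix, node))
--             if t not in node:
--                 node[t] = {}
--             node = node[t]
--             prefix += (t,)
--     return {p: sorted(node) for p, node in order}
-- ===== Notes on version B (the rewrite author's own statement) =====
-- stated objective: alternative
-- what changed: Replaces A's double loop that re-enumerates every prefix tuple at every depth into a dict of per-prefix sets by a token trie built in one walk per sid (recording each node the first time it gains a child) which is then flattened into the result dict.
import Mathlib
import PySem

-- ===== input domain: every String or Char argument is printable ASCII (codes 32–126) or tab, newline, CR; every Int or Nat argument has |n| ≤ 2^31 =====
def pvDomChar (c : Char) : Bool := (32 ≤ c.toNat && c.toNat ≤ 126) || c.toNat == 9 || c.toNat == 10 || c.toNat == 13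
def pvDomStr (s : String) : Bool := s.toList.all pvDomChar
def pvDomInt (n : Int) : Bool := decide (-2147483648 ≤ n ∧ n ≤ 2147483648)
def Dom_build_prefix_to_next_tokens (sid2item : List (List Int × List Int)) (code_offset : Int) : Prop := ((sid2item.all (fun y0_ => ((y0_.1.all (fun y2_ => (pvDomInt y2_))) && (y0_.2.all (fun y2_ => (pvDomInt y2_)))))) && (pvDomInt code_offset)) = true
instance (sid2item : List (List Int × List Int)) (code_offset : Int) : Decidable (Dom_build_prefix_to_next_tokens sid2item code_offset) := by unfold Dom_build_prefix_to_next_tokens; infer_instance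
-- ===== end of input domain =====

-- B replaces A's per-depth re-enumeration of every prefix into a dict of sets by a token trie
-- built in one walk per sid and then flattened into the same prefix table (a different data structure and traversal).

-- ===== PORT A =====
-- A-side helper: body of A's inner loop (one depth of one raw_sid).
-- raw_sid.getD i 0 is exact for Python's raw_sid[i]: every index used satisfies i < raw_sid.length.
def pvAStep (code_offset : Int) (raw_sid : List Int)
    (d : PySem.Dict (List Int) (PySem.Set Int)) (depth : Nat) :
    PySem.Dict (List Int) (PySem.Set Int) :=
  let pre := (List.range depth).map (fun i => raw_sid.getD i 0 + code_offset)
  let next_token := raw_sid.getD depth 0 + code_offset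
  let d1 := if d.contains pre then d else d.insert pre PySem.Set.empty
  d1.modify pre PySem.Set.empty (fun s => PySem.Set.add s next_token)

def build_prefix_to_next_tokens (sid2item : List (List Int × List Int)) (code_offset : Int) :
    List (List Int × List Int) :=
  let prefix_to_next : PySem.Dict (List Int) (PySem.Set Int) :=
    (sid2item.map Prod.fst).foldl
      (fun d raw_sid => (List.range raw_sid.length).foldl (pvAStep code_offset raw_sid) d)
      PySem.Dict.empty
  prefix_to_next.items.map (fun kv => (kv.1, PySem.List.sorted kv.2 (fun x => x) false))

-- ===== PORT B =====
-- B-side helper: body of B's inner loop (one token of one raw_sid).  The mutable pointer trie of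
-- Source B is represented by its path map: state = ((children map: prefix ↦ that node's child-token
-- list in insertion order, order: the recorded prefixes), current prefix); a node IS its path, so
-- "node = node[t]" is pre ++ [t], "t not in node" is t ∉ children(pre), "not node" is children(pre) = [].
def pvBStep (code_offset : Int)
    (s : (PySem.Dict (List Int) (List Int) × List (List Int)) × List Int) (tok : Int) :
    (PySem.Dict (List Int) (List Int) × List (List Int)) × List Int :=
  let ch := s.1.1
  let ord := s.1.2
  let pre := s.2
  let t := tok + code_offset
  let cur := ch.getD pre []
  let ord' := if cur = [] then ord ++ [pre] else ord
  let ch' := if t ∈ cur then ch else ch.insert pre (cur ++ [t])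
  ((ch', ord'), pre ++ [t])

def build_prefix_to_next_tokens_alt (sid2item : List (List Int × List Int)) (code_offset : Int) :
    List (List Int × List Int) :=
  let st :=
    (sid2item.map Prod.fst).foldl
      (fun st raw_sid => (raw_sid.foldl (pvBStep code_offset) (st, ([] : List Int))).1)
      (PySem.Dict.empty, [])
  st.2.map (fun p => (p, PySem.List.sorted (st.1.getD p []) (fun x => x) false))

-- ===== PRECONDITION & SPEC =====
def Spec_build_prefix_to_next_tokens (sid2item : List (List Int × List Int)) (code_offset : Int) (out : List (List Int × List Int)) : Prop := out = build_prefix_to_next_tokens_alt sid2item code_offset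
instance (sid2item : List (List Int × List Int)) (code_offset : Int) (out : List (List Int × List Int)) : Decidable (Spec_build_prefix_to_next_tokens sid2item code_offset out) := by unfold Spec_build_prefix_to_next_tokens; infer_instance

-- ===== CLAIM (what is proved, stated in full; the proofs are below) =====
def Claim_equal_build_prefix_to_next_tokens : Prop := ∀ (sid2item : List (List Int × List Int)) (code_offset : Int), Dom_build_prefix_to_next_tokens sid2item code_offset → Spec_build_prefix_to_next_tokens sid2item code_offset (build_prefix_to_next_tokens sid2item code_offset)

-- ===== LEMMAS AND PROOFS =====

-- Both inner loops process the same stream of (prefix, shifted token) events.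
def pvEvs (off : Int) (p : List Int) (sid : List Int) : List (List Int × Int) :=
  match sid with
  | [] => []
  | t :: r => (p, t + off) :: pvEvs off (p ++ [t + off]) r

def pvStepAE (d : PySem.Dict (List Int) (PySem.Set Int)) (e : List Int × Int) :
    PySem.Dict (List Int) (PySem.Set Int) :=
  let d1 := if d.contains e.1 then d else d.insert e.1 PySem.Set.empty
  d1.modify e.1 PySem.Set.empty (fun s => PySem.Set.add s e.2)

def pvStepBE (s : PySem.Dict (List Int) (List Int) × List (List Int)) (e : List Int × Int) :
    PySem.Dict (List Int) (List Int) × List (List Int) :=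
  let cur := s.1.getD e.1 []
  ((if e.2 ∈ cur then s.1 else s.1.insert e.1 (cur ++ [e.2])),
   (if cur = [] then s.2 ++ [e.1] else s.2))

lemma pvEvs_eq (off : Int) : ∀ (sid p : List Int),
    pvEvs off p sid = (List.range sid.length).map
      (fun k => (p ++ (List.range k).map (fun i => sid.getD i 0 + off), sid.getD k 0 + off)) := by
  intro sid
  induction sid with
  | nil => intro p; simp [pvEvs]
  | cons t r ih =>
    intro p
    simp only [pvEvs, ih]
    simp [List.range_succ_eq_map, List.map_map, Function.comp_def, List.append_assoc]

lemma pvA_inner (off : Int) (sid : List Int) (d : PySem.Dict (List Int) (PySem.Set Int)) :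
    (List.range sid.length).foldl (pvAStep off sid) d = (pvEvs off [] sid).foldl pvStepAE d := by
  rw [pvEvs_eq off sid [], List.foldl_map]
  congr 1

lemma pvB_inner (off : Int) : ∀ (sid p : List Int)
    (s : PySem.Dict (List Int) (List Int) × List (List Int)),
    sid.foldl (pvBStep off) (s, p) = ((pvEvs off p sid).foldl pvStepBE s, p ++ sid.map (· + off)) := by
  intro sid
  induction sid with
  | nil => intro p s; simp [pvEvs]
  | cons t r ih =>
    intro p s
    have hstep : pvBStep off (s, p) t = (pvStepBE s (p, t + off), p ++ [t + off]) := rfl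
    simp only [List.foldl_cons, pvEvs, hstep, ih]
    simp [List.append_assoc]

def pvInv (d : PySem.Dict (List Int) (PySem.Set Int))
    (s : PySem.Dict (List Int) (List Int) × List (List Int)) : Prop :=
  d.keys = s.2 ∧ d.keys.Nodup ∧
  (∀ p, (d.getD p PySem.Set.empty : List Int) = s.1.getD p []) ∧
  (∀ p, d.contains p = true ↔ (d.getD p PySem.Set.empty : List Int) ≠ [])

lemma pvInv_step {d : PySem.Dict (List Int) (PySem.Set Int)}
    {s : PySem.Dict (List Int) (List Int) × List (List Int)}
    (e : List Int × Int) (h : pvInv d s) : pvInv (pvStepAE d e) (pvStepBE s e) := by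
  obtain ⟨h1, h2, h3, h4⟩ := h
  obtain ⟨p, t⟩ := e
  have hmod : ∀ (dd : PySem.Dict (List Int) (PySem.Set Int)) (k : List Int)
      (f : PySem.Set Int → PySem.Set Int),
      dd.modify k PySem.Set.empty f = dd.insert k (f (dd.getD k PySem.Set.empty)) :=
    fun _ _ _ => rfl
  simp only [pvStepAE, pvStepBE]
  by_cases hc : d.contains p = true
  · have hdne : (d.getD p PySem.Set.empty : List Int) ≠ [] := (h4 p).mp hc
    have hne : s.1.getD p [] ≠ [] := (h3 p) ▸ hdne
    rw [if_pos hc, if_neg hne]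
    by_cases ht : t ∈ s.1.getD p []
    · have hadd : PySem.Set.add (d.getD p PySem.Set.empty) t = d.getD p PySem.Set.empty :=
        PySem.Set.add_of_mem (by rw [h3 p]; exact ht)
      rw [if_pos ht]
      simp only [hmod]
      rw [hadd]
      refine ⟨?_, ?_, fun q => ?_, fun q => ?_⟩
      · rw [PySem.Dict.keys_insert_of_contains d _ hc]; exact h1
      · rw [PySem.Dict.keys_insert_of_contains d _ hc]; exact h2
      · by_cases hq : q = p
        · subst hq; rw [PySem.Dict.getD_insert_self]; exact h3 q
        · rw [PySem.Dict.getD_insert_of_ne _ _ _ hq]; exact h3 q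
      · rw [PySem.Dict.contains_insert]
        by_cases hq : q = p
        · subst hq; rw [PySem.Dict.getD_insert_self]; simp; exact hdne
        · rw [PySem.Dict.getD_insert_of_ne _ _ _ hq]; simp [hq, h4 q]
    · have hadd : PySem.Set.add (d.getD p PySem.Set.empty) t
          = (d.getD p PySem.Set.empty : List Int) ++ [t] :=
        PySem.Set.add_of_not_mem (by rw [h3 p]; exact ht)
      rw [if_neg ht]
      simp only [hmod]
      rw [hadd]
      refine ⟨?_, ?_, fun q => ?_, fun q => ?_⟩
      · rw [PySem.Dict.keys_insert_of_contains d _ hc]; exact h1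
      · rw [PySem.Dict.keys_insert_of_contains d _ hc]; exact h2
      · by_cases hq : q = p
        · subst hq
          rw [PySem.Dict.getD_insert_self, PySem.Dict.getD_insert_self, h3 q]
        · rw [PySem.Dict.getD_insert_of_ne _ _ _ hq, PySem.Dict.getD_insert_of_ne _ _ _ hq]
          exact h3 q
      · rw [PySem.Dict.contains_insert]
        by_cases hq : q = p
        · subst hq; rw [PySem.Dict.getD_insert_self]; simp
        · rw [PySem.Dict.getD_insert_of_ne _ _ _ hq]; simp [hq, h4 q]
  · have hnil : (d.getD p PySem.Set.empty : List Int) = [] := by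
      by_contra hx; exact hc ((h4 p).mpr hx)
    have hcur : s.1.getD p [] = [] := (h3 p) ▸ hnil
    have hpnot : p ∉ d.keys := fun hmem => hc ((PySem.Dict.contains_iff_mem_keys d p).mpr hmem)
    have hc' : d.contains p = false := by
      cases hb : d.contains p with
      | false => rfl
      | true => exact absurd hb hc
    rw [if_neg hc, if_pos hcur, if_neg (show ¬ t ∈ s.1.getD p [] by rw [hcur]; simp)]
    simp only [hmod]
    rw [PySem.Dict.getD_insert_self, PySem.Dict.insert_insert_self,
      show PySem.Set.add PySem.Set.empty t = ([t] : List Int) from rfl, hcur, List.nil_append]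
    refine ⟨?_, ?_, fun q => ?_, fun q => ?_⟩
    · rw [PySem.Dict.keys_insert_of_not_contains d _ hc', h1]
    · rw [PySem.Dict.keys_insert_of_not_contains d _ hc']
      simp [List.nodup_append, h2]
      exact fun a ha hap => hpnot (hap ▸ ha)
    · by_cases hq : q = p
      · subst hq; rw [PySem.Dict.getD_insert_self, PySem.Dict.getD_insert_self]
      · rw [PySem.Dict.getD_insert_of_ne _ _ _ hq, PySem.Dict.getD_insert_of_ne _ _ _ hq]
        exact h3 q
    · rw [PySem.Dict.contains_insert]
      by_cases hq : q = p
      · subst hq; rw [PySem.Dict.getD_insert_self]; simp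
      · rw [PySem.Dict.getD_insert_of_ne _ _ _ hq]; simp [hq, h4 q]

lemma pvInv_foldl {d : PySem.Dict (List Int) (PySem.Set Int)}
    {s : PySem.Dict (List Int) (List Int) × List (List Int)}
    (es : List (List Int × Int)) (h : pvInv d s) :
    pvInv (es.foldl pvStepAE d) (es.foldl pvStepBE s) := by
  induction es generalizing d s with
  | nil => exact h
  | cons e r ih => exact ih (pvInv_step e h)

lemma pvInv_outer (off : Int) : ∀ (sids : List (List Int))
    (d : PySem.Dict (List Int) (PySem.Set Int))
    (s : PySem.Dict (List Int) (List Int) × List (List Int)), pvInv d s →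
    pvInv (sids.foldl (fun d raw_sid => (List.range raw_sid.length).foldl (pvAStep off raw_sid) d) d)
          (sids.foldl (fun st raw_sid => (raw_sid.foldl (pvBStep off) (st, ([] : List Int))).1) s) := by
  intro sids
  induction sids with
  | nil => intro d s h; exact h
  | cons sid r ih =>
    intro d s h
    simp only [List.foldl_cons]
    rw [pvA_inner, pvB_inner]
    exact ih _ _ (pvInv_foldl _ h)

lemma pvInv_emit {d : PySem.Dict (List Int) (PySem.Set Int)}
    {s : PySem.Dict (List Int) (List Int) × List (List Int)} (h : pvInv d s) :
    d.items.map (fun kv => (kv.1, PySem.List.sorted kv.2 (fun x => x) false))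
      = s.2.map (fun p => (p, PySem.List.sorted (s.1.getD p []) (fun x => x) false)) := by
  obtain ⟨h1, h2, h3, _⟩ := h
  rw [PySem.Dict.items_eq_map_keys d h2 PySem.Set.empty, List.map_map, h1]
  apply List.map_congr_left
  intro p _
  simp only [Function.comp_apply]
  rw [h3 p]

-- ===== VERDICT (by name: the statement is the Claim_ definition above) =====
theorem build_prefix_to_next_tokens_spec : Claim_equal_build_prefix_to_next_tokens := by
  intro sid2item code_offset _
  show build_prefix_to_next_tokens sid2item code_offset
      = build_prefix_to_next_tokens_alt sid2item code_offset
  have hbase : pvInv PySem.Dict.empty (PySem.Dict.empty, ([] : List (List Int))) := by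
    refine ⟨rfl, List.nodup_nil, fun p => ?_, fun p => ?_⟩
    · rw [PySem.Dict.getD_empty, PySem.Dict.getD_empty]; rfl
    · rw [PySem.Dict.getD_empty, PySem.Dict.contains_empty]; simp [PySem.Set.empty]
  exact pvInv_emit (pvInv_outer code_offset (sid2item.map Prod.fst) _ _ hbase)
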